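-- pv_equiv track=rewrite | github.com/uclaacm/lactf-archive | 2026/pwn/adventure/solve.py | find_byte_for_position
-- ===== SOURCE A (Python) =====
-- BOARD_SIZE = 16
--
-- def simulate_placement(addr_bytes_dict):
--     sim_board = [[0] * BOARD_SIZE for _ in range(BOARD_SIZE)]
--     positions = {}
--     for i in range(7, -1, -1):
--         if i not in addr_bytes_dict:
--             continue
--         byte_val = addr_bytes_dict[i]
--         x = (byte_val >> 4) & 0x0F
--         y = byte_val & 0x0F
--         while sim_board[y][x] != 0:
--             x = (x + 1) % BOARD_SIZE
--             if x == 0: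
--                 y = (y + 1) % BOARD_SIZE
--         sim_board[y][x] = i + 1
--         positions[i] = (x, y)
--     return positions
--
-- def find_byte_for_position(item_idx, target_pos, known_bytes):
--     for byte_val in range(256):
--         test_bytes = known_bytes.copy()
--         test_bytes[item_idx] = byte_val
--         positions = simulate_placement(test_bytes)
--         if positions.get(item_idx) == target_pos:
--             return byte_val
--     return None
-- ===== SOURCE B (Python) =====
-- BOARD_SIZE = 16
--
-- def find_byte_for_position(item_idx, target_pos, known_bytes):
--     if not (0 <= item_idx <= 7):
--         return None
--     # occupancy after placing only the items above item_idx (the ones placed first)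
--     occ = set()
--     for i in range(7, item_idx, -1):
--         if i not in known_bytes:
--             continue
--         v = known_bytes[i]
--         x = (v >> 4) & 0x0F
--         y = v & 0x0F
--         while (x, y) in occ:
--             x = (x + 1) % BOARD_SIZE
--             if x == 0:
--                 y = (y + 1) % BOARD_SIZE
--         occ.add((x, y))
--     if len(target_pos) != 2:
--         return None
--     tx, ty = target_pos
--     if not (0 <= tx < BOARD_SIZE and 0 <= ty < BOARD_SIZE) or (tx, ty) in occ:
--         return None
--     # walk backwards from the target through the contiguous occupied run;
--     # every cell of it (and the target itself) is a valid probe start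
--     best = tx * 16 + ty
--     x, y = tx, ty
--     while True:
--         if x == 0:
--             x, y = 15, (y - 1) % BOARD_SIZE
--         else:
--             x -= 1
--         if (x, y) not in occ:
--             break
--         best = min(best, x * 16 + y)
--     return best
-- ===== Notes on version B (the rewrite author's own statement) =====
-- stated objective: faster
-- what changed: A runs a full 8-item board simulation for each of the 256 candidate bytes; B builds the occupancy board once from only the items placed before item_idx, then walks backwards from the target cell through the contiguous occupied run and returns the minimal start byte, with no per-byte scan at all.
import Mathlib
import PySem

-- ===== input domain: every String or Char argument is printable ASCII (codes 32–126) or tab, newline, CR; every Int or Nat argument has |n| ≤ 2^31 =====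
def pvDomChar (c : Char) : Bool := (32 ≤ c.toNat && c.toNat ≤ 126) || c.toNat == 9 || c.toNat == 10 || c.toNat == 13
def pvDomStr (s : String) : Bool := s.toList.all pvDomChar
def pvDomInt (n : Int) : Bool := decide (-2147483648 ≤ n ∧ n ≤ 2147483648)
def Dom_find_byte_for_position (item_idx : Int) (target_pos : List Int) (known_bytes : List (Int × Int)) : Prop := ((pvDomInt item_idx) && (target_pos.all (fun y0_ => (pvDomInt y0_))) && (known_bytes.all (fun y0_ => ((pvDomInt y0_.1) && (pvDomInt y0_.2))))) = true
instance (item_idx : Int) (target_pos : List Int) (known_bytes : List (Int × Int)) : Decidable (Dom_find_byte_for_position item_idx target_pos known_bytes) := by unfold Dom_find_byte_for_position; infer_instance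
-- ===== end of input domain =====

-- B replaces A's 256 full board simulations by building the occupancy board once (only the
-- items placed before item_idx matter) and walking backwards from the target through the
-- occupied run, taking the minimum start byte; measurably faster by a constant factor.

-- ===== PORT A =====
-- board[y][x] (both indices always in [0,16) when called)
def pvCellA (board : List (List Int)) (x y : Int) : Int :=
  PySem.List.pyGetD (PySem.List.pyGetD board y []) x 0

-- board[y][x] = v (both indices always in [0,16) when called)
def pvSetA (board : List (List Int)) (x y v : Int) : List (List Int) :=
  PySem.List.pySetD board y (PySem.List.pySetD (PySem.List.pyGetD board y []) x v)

-- the 'while sim_board[y][x] != 0' loop; fuel 256 only makes the loop total (the board is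
-- never full: at most 8 items are placed, so the loop stops after at most 8 probes)
def pvWhileA (board : List (List Int)) : Nat → Int × Int → Int × Int
  | 0, xy => xy
  | fuel+1, (x, y) =>
    if pvCellA board x y ≠ 0 then
      let x' := PySem.Int.mod (x + 1) 16
      let y' := if x' = 0 then PySem.Int.mod (y + 1) 16 else y
      pvWhileA board fuel (x', y')
    else (x, y)

-- one iteration of A's 'for i in range(7, -1, -1)' body
def pvSimStep (d : PySem.Dict Int Int)
    (st : List (List Int) × PySem.Dict Int (Int × Int)) (i : Int) :
    List (List Int) × PySem.Dict Int (Int × Int) :=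
  match d.get? i with
  | none => st
  | some byte_val =>
    let x := PySem.Int.band (PySem.Int.floordiv byte_val 16) 15  -- (byte_val >> 4) & 0x0F
    let y := PySem.Int.band byte_val 15                          -- byte_val & 0x0F
    let xy := pvWhileA st.1 256 (x, y)
    (pvSetA st.1 xy.1 xy.2 (i + 1), st.2.insert i xy)

def pvSimulatePlacement (d : PySem.Dict Int Int) : PySem.Dict Int (Int × Int) :=
  (((PySem.List.pyRange 7 (-1) (-1)).foldl (pvSimStep d)
    ((PySem.List.pyRange 0 16 1).map (fun _ => List.replicate 16 (0 : Int)), PySem.Dict.empty))).2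

-- 'positions.get(item_idx) == target_pos' (a missing key compares unequal to a tuple)
def pvCheckA (item_idx : Int) (target_pos : List Int) (d : PySem.Dict Int Int) (b : Int) : Bool :=
  match (pvSimulatePlacement (d.insert item_idx b)).get? item_idx with
  | some xy => target_pos == [xy.1, xy.2]
  | none => false

def pvLoopA (item_idx : Int) (target_pos : List Int) (d : PySem.Dict Int Int) :
    List Int → Option Int
  | [] => none
  | b :: rest =>
    if pvCheckA item_idx target_pos d b then some b
    else pvLoopA item_idx target_pos d rest

def find_byte_for_position (item_idx : Int) (target_pos : List Int)
    (known_bytes : List (Int × Int)) : Option Int :=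
  pvLoopA item_idx target_pos (PySem.Dict.ofList known_bytes) (PySem.List.pyRange 0 256 1)

-- ===== PORT B =====
-- x = (x + 1) % 16; if x == 0: y = (y + 1) % 16
def pvStep (xy : Int × Int) : Int × Int :=
  let x := PySem.Int.mod (xy.1 + 1) 16
  (x, if x = 0 then PySem.Int.mod (xy.2 + 1) 16 else xy.2)

-- the 'while (x, y) in occ' probe on the occupancy set (fuel 256 only makes it total)
def pvProbeB (occ : PySem.Set (Int × Int)) : Nat → Int × Int → Int × Int
  | 0, c => c
  | fuel+1, c => if occ.contains c then pvProbeB occ fuel (pvStep c) else c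

-- occupancy set after placing the items with index > item_idx
def pvBuildOcc (d : PySem.Dict Int Int) (item_idx : Int) : PySem.Set (Int × Int) :=
  (PySem.List.pyRange 7 item_idx (-1)).foldl (fun occ i =>
    match d.get? i with
    | none => occ
    | some v =>
      occ.add (pvProbeB occ 256
        (PySem.Int.band (PySem.Int.floordiv v 16) 15, PySem.Int.band v 15))) PySem.Set.empty

-- the cell scanned just before xy in probe order
def pvPrev (xy : Int × Int) : Int × Int :=
  if xy.1 = 0 then (15, PySem.Int.mod (xy.2 - 1) 16) else (xy.1 - 1, xy.2)

-- walk backwards through the occupied run, tracking the minimal start byte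
def pvWalk (occ : PySem.Set (Int × Int)) : Nat → Int × Int → Int → Int
  | 0, _, best => best
  | fuel+1, c, best =>
    let p := pvPrev c
    if occ.contains p then pvWalk occ fuel p (min best (p.1 * 16 + p.2)) else best

def find_byte_for_position_alt (item_idx : Int) (target_pos : List Int)
    (known_bytes : List (Int × Int)) : Option Int :=
  if ¬ (0 ≤ item_idx ∧ item_idx ≤ 7) then none
  else
    let occ := pvBuildOcc (PySem.Dict.ofList known_bytes) item_idx
    match target_pos with
    | [tx, ty] =>
      if (0 ≤ tx ∧ tx < 16 ∧ 0 ≤ ty ∧ ty < 16) ∧ ¬ occ.contains (tx, ty) then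
        some (pvWalk occ 256 (tx, ty) (tx * 16 + ty))
      else none
    | _ => none

-- ===== PRECONDITION & SPEC =====
def Spec_find_byte_for_position (item_idx : Int) (target_pos : List Int) (known_bytes : List (Int × Int)) (out : Option Int) : Prop := out = find_byte_for_position_alt item_idx target_pos known_bytes
instance (item_idx : Int) (target_pos : List Int) (known_bytes : List (Int × Int)) (out : Option Int) : Decidable (Spec_find_byte_for_position item_idx target_pos known_bytes out) := by unfold Spec_find_byte_for_position; infer_instance

-- ===== CLAIM (what is proved, stated in full; the proofs are below) =====
def Claim_equal_find_byte_for_position : Prop := ∀ (item_idx : Int) (target_pos : List Int) (known_bytes : List (Int × Int)), Dom_find_byte_for_position item_idx target_pos known_bytes → Spec_find_byte_for_position item_idx target_pos known_bytes (find_byte_for_position item_idx target_pos known_bytes)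

-- ===== LEMMAS AND PROOFS =====

-- a cell of the 16×16 board
def pvInR (c : Int × Int) : Prop := 0 ≤ c.1 ∧ c.1 < 16 ∧ 0 ≤ c.2 ∧ c.2 < 16

-- linear code of a cell in probe order (pvStep is +1 mod 256)
def pvCode (c : Int × Int) : Int := c.1 + 16 * c.2

-- the byte whose start cell is c
def pvByte (c : Int × Int) : Int := c.1 * 16 + c.2

theorem pvInR_step {c : Int × Int} (h : pvInR c) : pvInR (pvStep c) := by
  obtain ⟨c1, c2⟩ := c
  simp only [pvInR, pvStep, PySem.Int.mod_eq_emod_of_pos (by norm_num : (0:Int) < 16)] at *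
  split_ifs <;> constructor <;> omega
theorem pvInR_prev {c : Int × Int} (h : pvInR c) : pvInR (pvPrev c) := by
  obtain ⟨c1, c2⟩ := c
  simp only [pvInR, pvPrev] at *
  split_ifs <;>
    simp only [PySem.Int.mod_eq_emod_of_pos (by norm_num : (0:Int) < 16)] <;> omega
theorem pvCode_step {c : Int × Int} (h : pvInR c) : pvCode (pvStep c) = (pvCode c + 1) % 256 := by
  obtain ⟨c1, c2⟩ := c
  simp only [pvInR, pvStep, pvCode, PySem.Int.mod_eq_emod_of_pos (by norm_num : (0:Int) < 16)] at *
  split_ifs with h1 <;> omega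
theorem pvCode_prev {c : Int × Int} (h : pvInR c) : pvCode (pvPrev c) = (pvCode c + 255) % 256 := by
  obtain ⟨c1, c2⟩ := c
  simp only [pvInR, pvPrev, pvCode] at *
  split_ifs with h1 <;>
    simp only [PySem.Int.mod_eq_emod_of_pos (by norm_num : (0:Int) < 16)] <;> omega
theorem pvCode_inj {c c' : Int × Int} (h : pvInR c) (h' : pvInR c') (he : pvCode c = pvCode c') : c = c' := by
  obtain ⟨c1, c2⟩ := c; obtain ⟨c1', c2'⟩ := c'
  simp only [pvInR, pvCode, Prod.mk.injEq] at *
  omega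
theorem pvStep_prev {c : Int × Int} (h : pvInR c) : pvStep (pvPrev c) = c :=
  pvCode_inj (pvInR_step (pvInR_prev h)) h (by
    rw [pvCode_step (pvInR_prev h), pvCode_prev h]
    obtain ⟨c1, c2⟩ := c
    simp only [pvInR, pvCode] at *
    omega)
theorem pvInR_prev_iter {c : Int × Int} (h : pvInR c) (j : Nat) : pvInR (pvPrev^[j] c) := by
  induction j with
  | zero => simpa using h
  | succ n ih => rw [Function.iterate_succ_apply']; exact pvInR_prev ih
theorem pvCode_prev_iter {c : Int × Int} (h : pvInR c) (j : Nat) :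
    pvCode (pvPrev^[j] c) = (pvCode c + 255 * j) % 256 := by
  induction j with
  | zero =>
    obtain ⟨c1, c2⟩ := c; simp only [pvInR] at h
    simp only [Function.iterate_zero_apply, Nat.cast_zero, mul_zero, add_zero, pvCode]
    omega
  | succ n ih =>
    rw [Function.iterate_succ_apply', pvCode_prev (pvInR_prev_iter h n), ih]
    push_cast
    omega
theorem pvPrev_iter_inj {c : Int × Int} (h : pvInR c) {i j : Nat} (hi : i < 256) (hj : j < 256)
    (he : pvPrev^[i] c = pvPrev^[j] c) : i = j := by
  have h1 := pvCode_prev_iter h i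
  have h2 := pvCode_prev_iter h j
  rw [he, h2] at h1
  obtain ⟨c1, c2⟩ := c; simp only [pvInR] at h
  omega
theorem pvStep_prev_iter {t : Int × Int} (h : pvInR t) {i j : Nat} (hij : i ≤ j) :
    pvStep^[i] (pvPrev^[j] t) = pvPrev^[j - i] t := by
  induction i with
  | zero => simp
  | succ n ih =>
    have hn : n ≤ j := by omega
    have hj1 : j - n = (j - (n+1)) + 1 := by omega
    rw [Function.iterate_succ_apply', ih hn, hj1, Function.iterate_succ_apply',
      pvStep_prev (pvInR_prev_iter h _)]
theorem pvProbeB_spec (occ : PySem.Set (Int × Int)) (n : Nat) :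
    ∀ (fuel : Nat) (c : Int × Int), (∀ i < n, occ.contains (pvStep^[i] c) = true) →
    occ.contains (pvStep^[n] c) = false → n ≤ fuel →
    pvProbeB occ fuel c = pvStep^[n] c := by
  induction n with
  | zero =>
    intro fuel c _ hfree _
    simp only [Function.iterate_zero_apply] at hfree
    rw [PySem.Set.contains] at hfree
    simp only [List.contains_eq_mem, decide_eq_false_iff_not] at hfree
    cases fuel with
    | zero => rfl
    | succ m => simp [pvProbeB, hfree]
  | succ n ih =>
    intro fuel c hocc hfree hle
    cases fuel with
    | zero => omega
    | succ m =>
      have h0 : occ.contains c = true := by simpa using hocc 0 (by omega)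
      simp only [pvProbeB, h0, if_true]
      rw [ih m (pvStep c) (fun i hi => by
            rw [← Function.iterate_succ_apply]; exact hocc (i+1) (by omega))
          (by rw [← Function.iterate_succ_apply]; exact hfree) (by omega)]
      rw [← Function.iterate_succ_apply]
theorem pvWalk_spec (occ : PySem.Set (Int × Int)) (r : Nat) :
    ∀ (fuel : Nat) (t : Int × Int) (best : Int),
    (∀ i, 1 ≤ i → i ≤ r → occ.contains (pvPrev^[i] t) = true) →
    occ.contains (pvPrev^[r+1] t) = false → r + 1 ≤ fuel →
    pvWalk occ fuel t best =
      ((List.range r).map (fun i => pvByte (pvPrev^[i+1] t))).foldl min best := by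
  induction r with
  | zero =>
    intro fuel t best _ hfree hle
    cases fuel with
    | zero => omega
    | succ m =>
      have hfree' : pvPrev t ∉ occ := by
        simpa [PySem.Set.contains, List.contains_eq_mem] using hfree
      simp [pvWalk, hfree']
  | succ r ih =>
    intro fuel t best hocc hfree hle
    cases fuel with
    | zero => omega
    | succ m =>
      have h1 : occ.contains (pvPrev t) = true := by simpa using hocc 1 (by omega) (by omega)
      simp only [pvWalk, h1, if_true]
      rw [ih m (pvPrev t) _ (fun i h1i hir => by
            rw [← Function.iterate_succ_apply]; exact hocc (i+1) (by omega) (by omega))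
          (by rw [← Function.iterate_succ_apply]; exact hfree) (by omega)]
      rw [List.range_succ_eq_map]
      simp only [List.map_cons, List.foldl_cons, List.map_map]
      congr 1
theorem pvFoldlMin_le_init (l : List Int) (b : Int) : l.foldl min b ≤ b := by
  induction l generalizing b with
  | nil => simp
  | cons x xs ih => simpa using le_trans (ih (min b x)) (min_le_left b x)
theorem pvFoldlMin_le_mem (l : List Int) (b x : Int) (hx : x ∈ l) : l.foldl min b ≤ x := by
  induction l generalizing b with
  | nil => simp at hx
  | cons y ys ih =>
    rcases List.mem_cons.mp hx with rfl | h
    · simpa using le_trans (pvFoldlMin_le_init ys (min b x)) (min_le_right b x)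
    · simpa using ih (min b y) h
theorem pvFoldlMin_mem (l : List Int) (b : Int) : l.foldl min b = b ∨ l.foldl min b ∈ l := by
  induction l generalizing b with
  | nil => simp
  | cons x xs ih =>
    simp only [List.foldl_cons]
    rcases ih (min b x) with h | h
    · rcases min_cases b x with ⟨h2, _⟩ | ⟨h2, _⟩
      · left; rw [h, h2]
      · right; rw [h, h2]; exact List.mem_cons_self
    · right; exact List.mem_cons_of_mem _ h
theorem pvLoopA_eq_filter_head (item_idx : Int) (target_pos : List Int) (d : PySem.Dict Int Int)
    (l : List Int) :
    pvLoopA item_idx target_pos d l = (l.filter (pvCheckA item_idx target_pos d)).head? := by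
  induction l with
  | nil => rfl
  | cons b rest ih =>
    simp only [pvLoopA, List.filter_cons]
    by_cases hb : pvCheckA item_idx target_pos d b <;> simp [hb, ih]

-- positions.get? item_idx is untouched by iterations over other indices
theorem pvFold_get_frozen (d : PySem.Dict Int Int) (item_idx : Int) (l : List Int)
    (hl : ∀ i ∈ l, i ≠ item_idx) :
    ∀ st : List (List Int) × PySem.Dict Int (Int × Int),
    (l.foldl (pvSimStep d) st).2.get? item_idx = st.2.get? item_idx := by
  induction l with
  | nil => intro st; rfl
  | cons i rest ih =>
    intro st
    simp only [List.foldl_cons]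
    rw [ih (fun j hj => hl j (List.mem_cons_of_mem _ hj))]
    have hi : item_idx ≠ i := (hl i List.mem_cons_self).symm
    unfold pvSimStep
    cases d.get? i with
    | none => rfl
    | some v => exact PySem.Dict.get?_insert_of_ne _ _ hi

def pvShape (board : List (List Int)) : Prop :=
  board.length = 16 ∧ ∀ row ∈ board, row.length = 16

def pvRel (board : List (List Int)) (occ : PySem.Set (Int × Int)) : Prop :=
  pvShape board ∧ ∀ c : Int × Int, pvInR c → (pvCellA board c.1 c.2 ≠ 0 ↔ occ.contains c = true)

theorem pvProbe_corr {board : List (List Int)} {occ : PySem.Set (Int × Int)}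
    (hR : pvRel board occ) : ∀ (fuel : Nat) (c : Int × Int), pvInR c →
    pvWhileA board fuel c = pvProbeB occ fuel c := by
  intro fuel
  induction fuel with
  | zero => intro c _; rfl
  | succ m ih =>
    rintro ⟨x, y⟩ hc
    have hiff := hR.2 (x, y) hc
    simp only [pvWhileA, pvProbeB]
    by_cases hocc : occ.contains (x, y) = true
    · rw [if_pos (hiff.mpr hocc), if_pos hocc]
      exact ih (pvStep (x, y)) (pvInR_step hc)
    · rw [if_neg (fun hne => hocc (hiff.mp hne)), if_neg (by simpa using hocc)]

-- reading a cell of an updated board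
theorem pvCellA_setA {board : List (List Int)} (hs : pvShape board)
    {c c' : Int × Int} (hc : pvInR c) (hc' : pvInR c') (v : Int) :
    pvCellA (pvSetA board c.1 c.2 v) c'.1 c'.2 =
      if c' = c then v else pvCellA board c'.1 c'.2 := by
  obtain ⟨cx, cy⟩ := c; obtain ⟨ux, uy⟩ := c'
  obtain ⟨hcx0, hcx1, hcy0, hcy1⟩ := hc
  obtain ⟨hux0, hux1, huy0, huy1⟩ := hc'
  obtain ⟨hlen, hrow⟩ := hs
  simp only at *
  have hcyl : cy.toNat < board.length := by omega
  have huyl : uy.toNat < board.length := by omega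
  have hrowc : PySem.List.pyGetD board cy [] = board[cy.toNat] :=
    PySem.List.pyGetD_eq_getElem board [] hcy0 (by omega)
  have hrowu : PySem.List.pyGetD board uy [] = board[uy.toNat] :=
    PySem.List.pyGetD_eq_getElem board [] huy0 (by omega)
  have hlc : board[cy.toNat].length = 16 := hrow _ (List.getElem_mem hcyl)
  have hlu : board[uy.toNat].length = 16 := hrow _ (List.getElem_mem huyl)
  unfold pvCellA pvSetA
  rw [hrowc, PySem.List.pySetD_of_nonneg _ _ hcx0, PySem.List.pySetD_of_nonneg _ _ hcy0]
  have hlen' : uy.toNat < (board.set cy.toNat (board[cy.toNat].set cx.toNat v)).length := by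
    rw [List.length_set]; omega
  rw [PySem.List.pyGetD_eq_getElem _ [] huy0 (by rw [List.length_set]; omega),
    List.getElem_set]
  by_cases hyy : cy.toNat = uy.toNat
  · rw [if_pos hyy]
    rw [PySem.List.pyGetD_eq_getElem _ 0 hux0 (by rw [List.length_set]; omega),
      List.getElem_set]
    by_cases hxx : cx.toNat = ux.toNat
    · rw [if_pos hxx, if_pos (by ext <;> simp <;> omega)]
    · rw [if_neg hxx, if_neg (by intro h; injection h with h1 h2; omega)]
      rw [hrowu, PySem.List.pyGetD_eq_getElem _ 0 hux0 (by omega)]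
      simp only [hyy]
  · rw [if_neg hyy, if_neg (by intro h; injection h with h1 h2; omega)]
    rw [hrowu, PySem.List.pyGetD_eq_getElem _ 0 hux0 (by omega)]

theorem pvRel_set {board : List (List Int)} {occ : PySem.Set (Int × Int)}
    (hR : pvRel board occ) {c : Int × Int} (hc : pvInR c) {v : Int} (hv : v ≠ 0) :
    pvRel (pvSetA board c.1 c.2 v) (occ.add c) := by
  obtain ⟨hs, hcell⟩ := hR
  constructor
  · constructor
    · unfold pvSetA
      rw [PySem.List.pySetD_of_nonneg _ _ hc.2.2.1, List.length_set]
      exact hs.1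
    · intro row hrowmem
      unfold pvSetA at hrowmem
      rw [PySem.List.pySetD_of_nonneg _ _ hc.2.2.1] at hrowmem
      rcases List.mem_or_eq_of_mem_set hrowmem with h | h
      · exact hs.2 row h
      · subst h
        rw [PySem.List.pySetD_of_nonneg _ _ hc.1, List.length_set]
        refine hs.2 _ (PySem.List.pyGetD_mem board [] ?_)
        have h1 := hs.1
        have h2 := hc.2.2.1
        have h3 := hc.2.2.2
        constructor <;> omega
  · intro c' hc'
    rw [pvCellA_setA hs hc hc' v]
    by_cases he : c' = c
    · simp only [he]
      constructor
      · intro _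
        simp only [PySem.Set.contains, List.contains_eq_mem, decide_eq_true_eq]
        have := (PySem.Set.mem_add occ c c).mpr (Or.inr rfl)
        exact this
      · intro _; exact hv
    · rw [if_neg he, hcell c' hc']
      simp only [PySem.Set.contains, List.contains_eq_mem, decide_eq_true_eq]
      rw [PySem.Set.mem_add occ c c']
      constructor
      · exact Or.inl
      · rintro (h | h)
        · exact h
        · exact absurd h he

theorem pvBand15_range (v : Int) : 0 ≤ PySem.Int.band v 15 ∧ PySem.Int.band v 15 < 16 := by
  unfold PySem.Int.band
  split_ifs with h1 h2 h2
  · have := Nat.and_le_right (n := v.toNat) (m := (15:Int).toNat)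
    constructor
    · positivity
    · have : v.toNat &&& (15:Int).toNat ≤ 15 := this
      omega
  · omega
  · have h15 : ((15:Int).toNat : Nat) = 15 := rfl
    have := Nat.and_le_left (n := (15:Int).toNat) (m := (-v - 1).toNat)
    omega
  · omega
theorem pvInR_startCell (v : Int) :
    pvInR (PySem.Int.band (PySem.Int.floordiv v 16) 15, PySem.Int.band v 15) := by
  have h1 := pvBand15_range (PySem.Int.floordiv v 16)
  have h2 := pvBand15_range v
  exact ⟨h1.1, h1.2, h2.1, h2.2⟩
theorem pvInR_probeB {occ : PySem.Set (Int × Int)} (fuel : Nat) {c : Int × Int} (hc : pvInR c) :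
    pvInR (pvProbeB occ fuel c) := by
  induction fuel generalizing c with
  | zero => exact hc
  | succ m ih =>
    simp only [pvProbeB]
    split
    · exact ih (pvInR_step hc)
    · exact hc

-- after building, the occupancy set is small and all its cells are on the board
theorem pvSetAdd_len {α : Type} [BEq α] (s : PySem.Set α) (x : α) :
    (s.add x).length ≤ s.length + 1 := by
  unfold PySem.Set.add
  split
  · omega
  · simp

theorem pvOccFold_len (d : PySem.Dict Int Int) (l : List Int) :
    ∀ occ : PySem.Set (Int × Int),
    (l.foldl (fun occ i =>
        match d.get? i with
        | none => occ
        | some v => occ.add (pvProbeB occ 256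
            (PySem.Int.band (PySem.Int.floordiv v 16) 15, PySem.Int.band v 15))) occ).length ≤
      occ.length + l.length := by
  induction l with
  | nil => intro occ; simp
  | cons i rest ih =>
    intro occ
    simp only [List.foldl_cons, List.length_cons]
    cases hd : d.get? i with
    | none =>
      dsimp only
      have := ih occ
      omega
    | some v =>
      dsimp only
      have := ih (occ.add (pvProbeB occ 256
          (PySem.Int.band (PySem.Int.floordiv v 16) 15, PySem.Int.band v 15)))
      have hL := pvSetAdd_len occ (pvProbeB occ 256
          (PySem.Int.band (PySem.Int.floordiv v 16) 15, PySem.Int.band v 15))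
      omega

theorem pvBuildOcc_len (d : PySem.Dict Int Int) (item_idx : Int) (h0 : 0 ≤ item_idx) :
    (pvBuildOcc d item_idx).length ≤ 7 := by
  unfold pvBuildOcc
  refine le_trans (pvOccFold_len d (PySem.List.pyRange 7 item_idx (-1)) PySem.Set.empty) ?_
  rw [PySem.List.length_pyRange_neg_one]
  simp only [PySem.Set.empty, List.length_nil]
  omega

-- part-1 correspondence: A's fold over the indices above item_idx tracks B's occupancy fold
theorem pvFold_corr (d d' : PySem.Dict Int Int) (l : List Int)
    (hl : ∀ i ∈ l, d'.get? i = d.get? i) (hnz : ∀ i ∈ l, 0 ≤ i) :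
    ∀ (st : List (List Int) × PySem.Dict Int (Int × Int)) (occ : PySem.Set (Int × Int)),
    pvRel st.1 occ →
    pvRel (l.foldl (pvSimStep d') st).1
      (l.foldl (fun occ i =>
        match d.get? i with
        | none => occ
        | some v => occ.add (pvProbeB occ 256
            (PySem.Int.band (PySem.Int.floordiv v 16) 15, PySem.Int.band v 15))) occ) := by
  induction l with
  | nil => intro st occ hR; exact hR
  | cons i rest ih =>
    intro st occ hR
    simp only [List.foldl_cons]
    have hdi : d'.get? i = d.get? i := hl i List.mem_cons_self
    have hl' : ∀ j ∈ rest, d'.get? j = d.get? j := fun j hj => hl j (List.mem_cons_of_mem _ hj)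
    have hnz' : ∀ j ∈ rest, 0 ≤ j := fun j hj => hnz j (List.mem_cons_of_mem _ hj)
    cases hd : d.get? i with
    | none =>
      have hA : pvSimStep d' st i = st := by unfold pvSimStep; rw [hdi, hd]
      rw [hA]
      exact ih hl' hnz' st occ hR
    | some v =>
      have hstart := pvInR_startCell v
      have hprobe := pvProbe_corr hR 256 _ hstart
      have hA : pvSimStep d' st i =
          (pvSetA st.1 (pvProbeB occ 256
              (PySem.Int.band (PySem.Int.floordiv v 16) 15, PySem.Int.band v 15)).1
            (pvProbeB occ 256
              (PySem.Int.band (PySem.Int.floordiv v 16) 15, PySem.Int.band v 15)).2 (i + 1),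
           st.2.insert i (pvProbeB occ 256
              (PySem.Int.band (PySem.Int.floordiv v 16) 15, PySem.Int.band v 15))) := by
        unfold pvSimStep
        rw [hdi, hd]
        simp only [hprobe]
      rw [hA]
      exact ih hl' hnz' _ _
        (pvRel_set hR (pvInR_probeB 256 hstart) (by have := hnz i List.mem_cons_self; omega))


theorem pvPrev_step {c : Int × Int} (h : pvInR c) : pvPrev (pvStep c) = c :=
  pvCode_inj (pvInR_prev (pvInR_step h)) h (by
    rw [pvCode_prev (pvInR_step h), pvCode_step h]
    obtain ⟨c1, c2⟩ := c
    simp only [pvInR, pvCode] at *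
    omega)

theorem pvInR_step_iter {c : Int × Int} (h : pvInR c) (j : Nat) : pvInR (pvStep^[j] c) := by
  induction j with
  | zero => simpa using h
  | succ n ih => rw [Function.iterate_succ_apply']; exact pvInR_step ih

theorem pvCode_step_iter {c : Int × Int} (h : pvInR c) (j : Nat) :
    pvCode (pvStep^[j] c) = (pvCode c + j) % 256 := by
  induction j with
  | zero =>
    obtain ⟨c1, c2⟩ := c; simp only [pvInR] at h
    simp only [Function.iterate_zero_apply, Nat.cast_zero, add_zero, pvCode]
    omega
  | succ n ih =>
    rw [Function.iterate_succ_apply', pvCode_step (pvInR_step_iter h n), ih]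
    push_cast
    omega

theorem pvStep_iter_inj {c : Int × Int} (h : pvInR c) {i j : Nat} (hi : i < 256) (hj : j < 256)
    (he : pvStep^[i] c = pvStep^[j] c) : i = j := by
  have h1 := pvCode_step_iter h i
  have h2 := pvCode_step_iter h j
  rw [he, h2] at h1
  obtain ⟨c1, c2⟩ := c; simp only [pvInR] at h
  omega

theorem pvPrev_step_iter {c : Int × Int} (h : pvInR c) (n : Nat) :
    pvPrev^[n] (pvStep^[n] c) = c := by
  induction n with
  | zero => rfl
  | succ m ih =>
    rw [Function.iterate_succ_apply' (f := pvStep), Function.iterate_succ_apply (f := pvPrev),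
      pvPrev_step (pvInR_step_iter h m), ih]

theorem pvBand15_mod {a : Int} (h : 0 ≤ a) : PySem.Int.band a 15 = a % 16 := by
  rw [PySem.Int.band_of_nonneg h (by norm_num)]
  have h15 : (15 : Int).toNat = 15 := rfl
  rw [h15, Nat.and_two_pow_sub_one_eq_mod a.toNat 4]
  omega

-- the start cell A computes for a byte in [0, 256)
theorem pvCell_byte {b : Int} (h0 : 0 ≤ b) (h1 : b < 256) :
    pvByte (PySem.Int.band (PySem.Int.floordiv b 16) 15, PySem.Int.band b 15) = b := by
  rw [PySem.Int.floordiv_eq_ediv_of_pos (by norm_num)]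
  rw [pvBand15_mod (by positivity), pvBand15_mod h0]
  simp only [pvByte]
  omega

theorem pvCell_of_byte {c : Int × Int} (h : pvInR c) :
    (PySem.Int.band (PySem.Int.floordiv (pvByte c) 16) 15, PySem.Int.band (pvByte c) 15) = c := by
  obtain ⟨cx, cy⟩ := c
  obtain ⟨h1, h2, h3, h4⟩ := h
  rw [PySem.Int.floordiv_eq_ediv_of_pos (by norm_num)]
  simp only [pvByte] at *
  rw [pvBand15_mod (by positivity), pvBand15_mod (by positivity)]
  have : (cx * 16 + cy) / 16 = cx := by omega
  rw [this, Prod.mk.injEq]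
  constructor <;> omega

theorem pvByte_range {c : Int × Int} (h : pvInR c) : 0 ≤ pvByte c ∧ pvByte c < 256 := by
  obtain ⟨cx, cy⟩ := c
  obtain ⟨h1, h2, h3, h4⟩ := h
  simp only [pvByte]
  omega

theorem pvRangeSplit (item_idx : Int) (h0 : 0 ≤ item_idx) (h7 : item_idx ≤ 7) :
    PySem.List.pyRange 7 (-1) (-1) =
      PySem.List.pyRange 7 item_idx (-1) ++
        item_idx :: PySem.List.pyRange (item_idx - 1) (-1) (-1) := by
  have h1 : PySem.List.pyRange 7 (-1) (-1) = (PySem.List.pyRange 0 8 1).reverse := by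
    rw [PySem.List.pyRange_neg_one_eq_reverse]; norm_num
  rw [h1, PySem.List.pyRange_one_append 0 (item_idx + 1) 8 (by omega) (by omega),
    List.reverse_append]
  congr 1
  · rw [PySem.List.pyRange_neg_one_eq_reverse 7 item_idx]
    norm_num
  · rw [show (PySem.List.pyRange 0 (item_idx + 1) 1).reverse =
        PySem.List.pyRange item_idx (-1) (-1) by
      rw [PySem.List.pyRange_neg_one_eq_reverse item_idx (-1)]; norm_num]
    exact PySem.List.pyRange_neg_one_cons (by omega)

theorem pvRel_init :
    pvRel ((PySem.List.pyRange 0 16 1).map (fun _ => List.replicate 16 (0 : Int)))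
      PySem.Set.empty := by
  constructor
  · constructor
    · rw [List.length_map, PySem.List.length_pyRange_one]; rfl
    · intro row hrow
      rcases List.mem_map.mp hrow with ⟨_, _, rfl⟩
      exact List.length_replicate
  · intro c hc
    have hlen : ((PySem.List.pyRange 0 16 1).map
        (fun _ => List.replicate 16 (0 : Int))).length = 16 := by
      rw [List.length_map, PySem.List.length_pyRange_one]; rfl
    have hrowmem := PySem.List.pyGetD_mem ((PySem.List.pyRange 0 16 1).map
        (fun _ => List.replicate 16 (0 : Int))) (i := c.2) []
      (by rw [hlen]; have := hc.2.2.1; have := hc.2.2.2; constructor <;> omega)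
    rcases List.mem_map.mp hrowmem with ⟨_, _, hrow⟩
    have hcell := PySem.List.pyGetD_mem (PySem.List.pyGetD ((PySem.List.pyRange 0 16 1).map
        (fun _ => List.replicate 16 (0 : Int))) c.2 []) (i := c.1) 0
      (by rw [← hrow, List.length_replicate]; have := hc.1; have := hc.2.1; constructor <;> omega)
    rw [← hrow] at hcell
    have hz := List.eq_of_mem_replicate hcell
    unfold pvCellA
    rw [← hrow, hz]
    simp [PySem.Set.empty, PySem.Set.contains]

-- among the 8 cells preceding t there is a free one (the set has at most 7 cells)
theorem pvExFree (occ : PySem.Set (Int × Int)) (hlen : occ.length ≤ 7)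
    (t : Int × Int) (f : Int × Int → Int × Int)
    (hiter : ∀ j : Nat, j < 8 → ∀ i : Nat, i < 8 → f^[i] t = f^[j] t → i = j) :
    ∃ j : Nat, j < 8 ∧ occ.contains (f^[j] t) = false := by
  by_contra hno
  push Not at hno
  have hall : ∀ j : Nat, j < 8 → f^[j] t ∈ occ := by
    intro j hj
    have := hno j hj
    simpa [PySem.Set.contains, List.contains_eq_mem] using this
  have hsub : (Finset.range 8).image (fun j => f^[j] t) ⊆ occ.toFinset := by
    intro c hcmem
    rcases Finset.mem_image.mp hcmem with ⟨j, hj, rfl⟩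
    exact List.mem_toFinset.mpr (hall j (Finset.mem_range.mp hj))
  have hcard : ((Finset.range 8).image (fun j => f^[j] t)).card = 8 := by
    rw [Finset.card_image_of_injOn, Finset.card_range]
    intro i hi j hj hij
    exact hiter j (by have := Finset.mem_range.mp hj; omega) i
      (by have := Finset.mem_range.mp hi; omega) hij
  have h1 := Finset.card_le_card hsub
  have h2 := List.toFinset_card_le occ
  omega




theorem pvSimStep_self (d' : PySem.Dict Int Int)
    (st : List (List Int) × PySem.Dict Int (Int × Int)) (item_idx b : Int)
    (hself : d'.get? item_idx = some b) :
    (pvSimStep d' st item_idx).2.get? item_idx =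
      some (pvWhileA st.1 256
        (PySem.Int.band (PySem.Int.floordiv b 16) 15, PySem.Int.band b 15)) := by
  unfold pvSimStep
  rw [hself]
  exact PySem.Dict.get?_insert_self _ _ _

-- A's per-byte check, reduced to one probe on B's precomputed occupancy set
theorem pvCheck_eq (item_idx : Int) (target_pos : List Int) (d : PySem.Dict Int Int) (b : Int)
    (h0 : 0 ≤ item_idx) (h7 : item_idx ≤ 7) :
    pvCheckA item_idx target_pos d b =
      (target_pos == [(pvProbeB (pvBuildOcc d item_idx) 256
          (PySem.Int.band (PySem.Int.floordiv b 16) 15, PySem.Int.band b 15)).1,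
        (pvProbeB (pvBuildOcc d item_idx) 256
          (PySem.Int.band (PySem.Int.floordiv b 16) 15, PySem.Int.band b 15)).2]) := by
  unfold pvCheckA pvSimulatePlacement
  rw [pvRangeSplit item_idx h0 h7, List.foldl_append, List.foldl_cons]
  have hrel : pvRel ((PySem.List.pyRange 7 item_idx (-1)).foldl (pvSimStep (d.insert item_idx b))
      ((PySem.List.pyRange 0 16 1).map (fun _ => List.replicate 16 (0 : Int)),
        PySem.Dict.empty)).1 (pvBuildOcc d item_idx) :=
    pvFold_corr d (d.insert item_idx b) (PySem.List.pyRange 7 item_idx (-1))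
      (fun i hi => PySem.Dict.get?_insert_of_ne d b
        (by have := PySem.List.mem_pyRange_neg_one.mp hi; omega))
      (fun i hi => by have := PySem.List.mem_pyRange_neg_one.mp hi; omega)
      _ PySem.Set.empty pvRel_init
  rw [pvFold_get_frozen (d.insert item_idx b) item_idx _
    (fun i hi => by have := PySem.List.mem_pyRange_neg_one.mp hi; omega)]
  rw [pvSimStep_self (d.insert item_idx b) _ item_idx b (PySem.Dict.get?_insert_self d item_idx b),
    pvProbe_corr hrel 256 _ (pvInR_startCell b)]

theorem pvFilterHead_min {l : List Int} (hl : l.Pairwise (· < ·)) {q : Int → Bool} {m : Int}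
    (hm : q m = true) (hmem : m ∈ l) (hle : ∀ x ∈ l, q x = true → m ≤ x) :
    (l.filter q).head? = some m := by
  have hmf : m ∈ l.filter q := List.mem_filter.mpr ⟨hmem, hm⟩
  cases hf : l.filter q with
  | nil => rw [hf] at hmf; simp at hmf
  | cons h tl =>
    have hhf : h ∈ l.filter q := by rw [hf]; exact List.mem_cons_self
    have hql := List.mem_filter.mp hhf
    have h1 : m ≤ h := hle h hql.1 hql.2
    have hpair : (l.filter q).Pairwise (· < ·) := hl.filter q
    rw [hf] at hpair hmf
    rcases List.mem_cons.mp hmf with rfl | hmtl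
    · rfl
    · have := (List.pairwise_cons.mp hpair).1 m hmtl
      have : h = m := by omega
      rw [this]
      rfl

-- the probe on a ≤7-cell occupancy set: its landing cell, and where it lands on t
theorem pvProbe_rep (occ : PySem.Set (Int × Int)) (hlen : occ.length ≤ 7)
    {c : Int × Int} (hc : pvInR c) :
    ∃ n : Nat, n < 8 ∧ (∀ i < n, occ.contains (pvStep^[i] c) = true) ∧
      occ.contains (pvStep^[n] c) = false ∧ pvProbeB occ 256 c = pvStep^[n] c := by
  have hex : ∃ j : Nat, j < 8 ∧ occ.contains (pvStep^[j] c) = false :=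
    pvExFree occ hlen c pvStep
      (fun j hj i hi he => pvStep_iter_inj hc (by omega) (by omega) he)
  have hex' : ∃ j : Nat, occ.contains (pvStep^[j] c) = false := ⟨hex.choose, hex.choose_spec.2⟩
  let n := Nat.find hex'
  have hn8 : n < 8 := by
    rcases hex with ⟨j, hj8, hjf⟩
    have := Nat.find_min' hex' hjf
    omega
  refine ⟨n, hn8, ?_, Nat.find_spec hex', ?_⟩
  · intro i hi
    have := Nat.find_min hex' hi
    simpa using this
  · exact pvProbeB_spec occ n 256 c
      (fun i hi => by have := Nat.find_min hex' hi; simpa using this)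
      (Nat.find_spec hex') (by omega)

-- the backward run from a free target cell
theorem pvRun_rep (occ : PySem.Set (Int × Int)) (hlen : occ.length ≤ 7)
    {t : Int × Int} (ht : pvInR t) :
    ∃ r : Nat, r < 8 ∧ (∀ i, 1 ≤ i → i ≤ r → occ.contains (pvPrev^[i] t) = true) ∧
      occ.contains (pvPrev^[r+1] t) = false := by
  have hex : ∃ j : Nat, j < 8 ∧ occ.contains (pvPrev^[j+1] t) = false := by
    rcases pvExFree occ hlen (pvPrev t) pvPrev
      (fun j hj i hi he => by
        have h1 : pvPrev^[i+1] t = pvPrev^[j+1] t := by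
          rw [Function.iterate_succ_apply, Function.iterate_succ_apply]; exact he
        have := pvPrev_iter_inj ht (i := i+1) (j := j+1) (by omega) (by omega) h1
        omega) with ⟨j, hj8, hjf⟩
    exact ⟨j, hj8, by rw [Function.iterate_succ_apply]; exact hjf⟩
  have hex' : ∃ j : Nat, occ.contains (pvPrev^[j+1] t) = false := ⟨hex.choose, hex.choose_spec.2⟩
  let r := Nat.find hex'
  have hr8 : r < 8 := by
    rcases hex with ⟨j, hj8, hjf⟩
    have := Nat.find_min' hex' hjf
    omega
  refine ⟨r, hr8, ?_, Nat.find_spec hex'⟩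
  intro i h1i hir
  have := Nat.find_min hex' (m := i - 1) (by omega)
  simp only [Bool.not_eq_false] at this
  have hi1 : i - 1 + 1 = i := by omega
  rwa [hi1] at this

-- where A's probe lands on the target, characterized by B's backward run
theorem pvProbe_eq_iff (occ : PySem.Set (Int × Int)) (hlen : occ.length ≤ 7)
    {t : Int × Int} (ht : pvInR t) (htf : occ.contains t = false)
    {r : Nat} (hr : r < 8)
    (hocc : ∀ i, 1 ≤ i → i ≤ r → occ.contains (pvPrev^[i] t) = true)
    (hfree : occ.contains (pvPrev^[r+1] t) = false)
    {c : Int × Int} (hc : pvInR c) :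
    pvProbeB occ 256 c = t ↔ ∃ j : Nat, j ≤ r ∧ c = pvPrev^[j] t := by
  constructor
  · intro hp
    rcases pvProbe_rep occ hlen hc with ⟨n, hn8, hnocc, hnfree, hnval⟩
    rw [hnval] at hp
    have hcb : c = pvPrev^[n] t := by rw [← hp, pvPrev_step_iter hc]
    refine ⟨n, ?_, hcb⟩
    by_contra hgt
    have hrn : r + 1 ≤ n := by omega
    have hi : n - (r+1) < n := by omega
    have := hnocc (n - (r+1)) hi
    rw [hcb, pvStep_prev_iter ht (by omega)] at this
    have hEq : n - (n - (r+1)) = r + 1 := by omega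
    rw [hEq] at this
    rw [this] at hfree
    exact absurd hfree (by simp)
  · rintro ⟨j, hjr, rfl⟩
    have hval := pvProbeB_spec occ j 256 (pvPrev^[j] t)
      (fun i hij => by
        rw [pvStep_prev_iter ht (by omega)]
        exact hocc (j - i) (by omega) (by omega))
      (by rw [pvStep_prev_iter ht (le_refl j), Nat.sub_self]
          simpa using htf) (by omega)
    rw [hval, pvStep_prev_iter ht (le_refl j), Nat.sub_self, Function.iterate_zero_apply]


theorem pvCheckA_out (item_idx : Int) (target_pos : List Int) (d : PySem.Dict Int Int) (b : Int)
    (hout : ¬ (0 ≤ item_idx ∧ item_idx ≤ 7)) :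
    pvCheckA item_idx target_pos d b = false := by
  unfold pvCheckA pvSimulatePlacement
  rw [pvFold_get_frozen (d.insert item_idx b) item_idx _
    (fun i hi => by have := PySem.List.mem_pyRange_neg_one.mp hi; omega),
    PySem.Dict.get?_empty]

theorem pvFilter_none {l : List Int} {q : Int → Bool} (h : ∀ b ∈ l, q b = false) :
    (l.filter q).head? = none := by
  rw [List.filter_eq_nil_iff.mpr (fun a ha => by rw [h a ha]; simp)]
  rfl

-- the byte 256-range scan of A against B's backward walk, valid-target case
theorem pvValid (item_idx : Int) (tx ty : Int) (d : PySem.Dict Int Int)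
    (h0 : 0 ≤ item_idx) (h7 : item_idx ≤ 7) (hInRt : pvInR (tx, ty))
    (htf : (pvBuildOcc d item_idx).contains (tx, ty) = false) :
    ((PySem.List.pyRange 0 256 1).filter (pvCheckA item_idx [tx, ty] d)).head? =
      some (pvWalk (pvBuildOcc d item_idx) 256 (tx, ty) (tx * 16 + ty)) := by
  have hlen := pvBuildOcc_len d item_idx h0
  obtain ⟨r, hr8, hoccr, hfree⟩ := pvRun_rep (pvBuildOcc d item_idx) hlen hInRt
  have hwalk := pvWalk_spec (pvBuildOcc d item_idx) r 256 (tx, ty) (pvByte (tx, ty))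
    hoccr hfree (by omega)
  have hbyte_t : pvByte (tx, ty) = tx * 16 + ty := rfl
  rw [← hbyte_t, hwalk]
  -- the minimum over the candidate start cells
  have hcand : ∃ j : Nat, j ≤ r ∧
      ((List.range r).map (fun i => pvByte (pvPrev^[i+1] (tx, ty)))).foldl min
        (pvByte (tx, ty)) = pvByte (pvPrev^[j] (tx, ty)) := by
    rcases pvFoldlMin_mem ((List.range r).map (fun i => pvByte (pvPrev^[i+1] (tx, ty))))
        (pvByte (tx, ty)) with h | h
    · exact ⟨0, by omega, by rw [h]; rfl⟩
    · rcases List.mem_map.mp h with ⟨i, hi, hv⟩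
      exact ⟨i + 1, by have := List.mem_range.mp hi; omega, by rw [← hv]⟩
  obtain ⟨j, hjr, hm⟩ := hcand
  have hcj : pvInR (pvPrev^[j] (tx, ty)) := pvInR_prev_iter hInRt j
  apply pvFilterHead_min (PySem.List.pairwise_lt_pyRange_one 0 256)
  · -- the candidate byte passes A's check
    rw [hm, pvCheck_eq item_idx [tx, ty] d _ h0 h7, pvCell_of_byte hcj,
      (pvProbe_eq_iff (pvBuildOcc d item_idx) hlen hInRt htf hr8 hoccr hfree hcj).mpr
        ⟨j, hjr, rfl⟩]
    simp
  · rw [hm]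
    exact PySem.List.mem_pyRange_one.mpr ⟨(pvByte_range hcj).1, (pvByte_range hcj).2⟩
  · -- it is the least byte passing A's check
    intro x hx hq
    have hx' := PySem.List.mem_pyRange_one.mp hx
    rw [pvCheck_eq item_idx [tx, ty] d _ h0 h7] at hq
    have hq' := eq_of_beq hq
    have hcx : pvInR (PySem.Int.band (PySem.Int.floordiv x 16) 15, PySem.Int.band x 15) :=
      pvInR_startCell x
    have hp : pvProbeB (pvBuildOcc d item_idx) 256
        (PySem.Int.band (PySem.Int.floordiv x 16) 15, PySem.Int.band x 15) = (tx, ty) := by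
      injection hq' with h1 h2
      injection h2 with h2 _
      exact Prod.ext h1.symm h2.symm
    rcases (pvProbe_eq_iff (pvBuildOcc d item_idx) hlen hInRt htf hr8 hoccr hfree hcx).mp hp
      with ⟨j', hj'r, hcell⟩
    have hxb : x = pvByte (pvPrev^[j'] (tx, ty)) := by
      rw [← hcell, pvCell_byte hx'.1 hx'.2]
    rw [hxb]
    cases j' with
    | zero => exact pvFoldlMin_le_init _ _
    | succ i =>
      exact pvFoldlMin_le_mem _ _ _
        (List.mem_map.mpr ⟨i, List.mem_range.mpr (Nat.lt_of_succ_le hj'r), rfl⟩)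

-- invalid targets: no byte ever passes A's check
theorem pvInvalid (item_idx : Int) (tx ty : Int) (d : PySem.Dict Int Int) (b : Int)
    (h0 : 0 ≤ item_idx) (h7 : item_idx ≤ 7)
    (hbad : ¬ pvInR (tx, ty) ∨ (pvBuildOcc d item_idx).contains (tx, ty) = true) :
    pvCheckA item_idx [tx, ty] d b = false := by
  have hlen := pvBuildOcc_len d item_idx h0
  rw [pvCheck_eq item_idx [tx, ty] d b h0 h7]
  by_contra hq
  simp only [Bool.not_eq_false] at hq
  have hq' := eq_of_beq hq
  have hcx : pvInR (PySem.Int.band (PySem.Int.floordiv b 16) 15, PySem.Int.band b 15) :=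
    pvInR_startCell b
  have hp : pvProbeB (pvBuildOcc d item_idx) 256
      (PySem.Int.band (PySem.Int.floordiv b 16) 15, PySem.Int.band b 15) = (tx, ty) := by
    injection hq' with h1 h2
    injection h2 with h2 _
    exact Prod.ext h1.symm h2.symm
  rcases pvProbe_rep (pvBuildOcc d item_idx) hlen hcx with ⟨n, _, _, hnfree, hnval⟩
  rcases hbad with hbad | hbad
  · exact hbad (hp ▸ pvInR_probeB 256 hcx)
  · rw [hnval] at hp
    rw [hp] at hnfree
    rw [hbad] at hnfree
    exact absurd hnfree (by simp)

-- ===== VERDICT (by name: the statement is the Claim_ definition above) =====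
theorem find_byte_for_position_spec : Claim_equal_find_byte_for_position := by
  unfold Claim_equal_find_byte_for_position
  intro item_idx target_pos known_bytes _
  unfold Spec_find_byte_for_position find_byte_for_position find_byte_for_position_alt
  rw [pvLoopA_eq_filter_head]
  by_cases hid : 0 ≤ item_idx ∧ item_idx ≤ 7
  · obtain ⟨h0, h7⟩ := hid
    rw [if_neg (not_not_intro ⟨h0, h7⟩)]
    rcases target_pos with _ | ⟨t1, _ | ⟨t2, _ | ⟨t3, rest⟩⟩⟩
    · exact pvFilter_none (fun b _ => by
        rw [pvCheck_eq item_idx [] _ b h0 h7]; rfl)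
    · exact pvFilter_none (fun b _ => by
        rw [pvCheck_eq item_idx [t1] _ b h0 h7]
        exact beq_eq_false_iff_ne.mpr (by simp))
    · dsimp only
      by_cases hInRt : pvInR (t1, t2)
      · by_cases hoccT : (pvBuildOcc (PySem.Dict.ofList known_bytes) item_idx).contains
            (t1, t2) = true
        · rw [if_neg (by intro hcon; rw [hoccT] at hcon; exact hcon.2 rfl)]
          exact pvFilter_none (fun b _ =>
            pvInvalid item_idx t1 t2 _ b h0 h7 (Or.inr hoccT))
        · have htf : (pvBuildOcc (PySem.Dict.ofList known_bytes) item_idx).contains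
              (t1, t2) = false := by simpa using hoccT
          rw [if_pos ⟨⟨hInRt.1, hInRt.2.1, hInRt.2.2.1, hInRt.2.2.2⟩, by rw [htf]; simp⟩]
          exact pvValid item_idx t1 t2 _ h0 h7 hInRt htf
      · rw [if_neg (by
          intro hcon
          exact hInRt ⟨hcon.1.1, hcon.1.2.1, hcon.1.2.2.1, hcon.1.2.2.2⟩)]
        exact pvFilter_none (fun b _ =>
          pvInvalid item_idx t1 t2 _ b h0 h7 (Or.inl hInRt))
    · exact pvFilter_none (fun b _ => by
        rw [pvCheck_eq item_idx (t1 :: t2 :: t3 :: rest) _ b h0 h7]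
        exact beq_eq_false_iff_ne.mpr (by simp))
  · rw [if_pos hid]
    exact pvFilter_none (fun b _ => pvCheckA_out item_idx target_pos _ b hid)
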